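-- pv_equiv track=rewrite | github.com/navya099/test | bve곡선레일구문생성기.py | cal_X
-- ===== SOURCE A (Python) =====
-- increment = 5  #계산간격
--
-- def cal_X(direction, ordinate1, ordinate2):
--     X = []
--     for i in range(increment):
--         if i == 0:
--             x = 0
--         elif i == 1 or i == 4:
--             x = ordinate1 if direction == -1 else -ordinate1
--         elif i == 2 or i == 3:
--             x = ordinate2 if direction == -1 else -ordinate2
--         X.append(x)
--     return X
-- ===== SOURCE B (Python) =====
-- increment = 5  # kept for module parity; B does not iterate it
--
-- def cal_X(direction, ordinate1, ordinate2):
--     # Sign-multiply instead of branching per value, then mirror the half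
--     # list palindromically: [0, s*o1, s*o2] followed by its reversed tail.
--     s = 1 if direction == -1 else -1
--     half = [0, s * ordinate1, s * ordinate2]
--     return half + half[:0:-1]
-- ===== Notes on version B (the rewrite author's own statement) =====
-- stated objective: simpler
-- what changed: Instead of looping range(5) and dispatching on the index with conditional negation per element, B computes a sign factor once, multiplies it into the two ordinates to form the three-element half [0, s*o1, s*o2], and produces the palindromic result as half + half[:0:-1] (mirrored tail).
import Mathlib
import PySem

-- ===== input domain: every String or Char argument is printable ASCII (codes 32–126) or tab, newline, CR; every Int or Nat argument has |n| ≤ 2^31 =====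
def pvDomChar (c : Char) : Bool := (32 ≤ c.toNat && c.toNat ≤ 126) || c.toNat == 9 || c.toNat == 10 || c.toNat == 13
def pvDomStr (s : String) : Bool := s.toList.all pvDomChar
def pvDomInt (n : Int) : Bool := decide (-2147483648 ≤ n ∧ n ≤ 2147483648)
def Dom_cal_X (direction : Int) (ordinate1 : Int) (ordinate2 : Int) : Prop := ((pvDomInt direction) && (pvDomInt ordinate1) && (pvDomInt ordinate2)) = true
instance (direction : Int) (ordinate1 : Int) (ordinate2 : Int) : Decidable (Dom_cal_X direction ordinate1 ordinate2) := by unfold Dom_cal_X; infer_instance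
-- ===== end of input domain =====

-- B builds the result by sign-multiplying once and mirroring a half list (simpler, no loop/index dispatch); A loops range(5).

-- ===== PORT A =====
def calXStep (direction : Int) (ordinate1 : Int) (ordinate2 : Int) (i : Int) : Int :=
  if i == 0 then 0
  else if i == 1 || i == 4 then (if direction == -1 then ordinate1 else -ordinate1)
  else if i == 2 || i == 3 then (if direction == -1 then ordinate2 else -ordinate2)
  else 0  -- unreachable for i in range(5)

def cal_X (direction : Int) (ordinate1 : Int) (ordinate2 : Int) : List Int :=
  (PySem.List.pyRange 0 5 1).foldl (fun X i => X ++ [calXStep direction ordinate1 ordinate2 i]) []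

-- ===== PORT B =====
def cal_X_alt (direction : Int) (ordinate1 : Int) (ordinate2 : Int) : List Int :=
  let s : Int := if direction == -1 then 1 else -1
  let half : List Int := [0, s * ordinate1, s * ordinate2]
  half ++ (PySem.List.slice? half none (some 0) (-1)).getD []  -- half[:0:-1]; step ≠ 0 so never none

-- ===== PRECONDITION & SPEC =====
def Spec_cal_X (direction : Int) (ordinate1 : Int) (ordinate2 : Int) (out : List Int) : Prop := out = cal_X_alt direction ordinate1 ordinate2
instance (direction : Int) (ordinate1 : Int) (ordinate2 : Int) (out : List Int) : Decidable (Spec_cal_X direction ordinate1 ordinate2 out) := by unfold Spec_cal_X; infer_instance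

-- ===== CLAIM (what is proved, stated in full; the proofs are below) =====
def Claim_equal_cal_X : Prop := ∀ (direction : Int) (ordinate1 : Int) (ordinate2 : Int), Dom_cal_X direction ordinate1 ordinate2 → Spec_cal_X direction ordinate1 ordinate2 (cal_X direction ordinate1 ordinate2)

-- ===== LEMMAS AND PROOFS =====

-- ===== VERDICT (by name: the statement is the Claim_ definition above) =====
theorem cal_X_spec : Claim_equal_cal_X := by
  intro direction ordinate1 ordinate2 _
  unfold Spec_cal_X cal_X cal_X_alt calXStep
  simp [PySem.List.pyRange, List.range_succ, PySem.List.slice?]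
  by_cases h : direction = -1 <;> simp [h, PySem.List.sliceIndices, List.range_succ]
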